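-- pv_equiv track=rewrite | github.com/juzeon/lexicon-lab | lexicon/search.py | _parse_quantifier
-- ===== SOURCE A (Python) =====
-- def _parse_quantifier(pattern: str, start_pos: int) -> tuple[str, int] | None:
--     """Parse regex quantifier like {n}, {m,n}, {m,}, {,n}.
--
--     Args:
--         pattern: The regex pattern string
--         start_pos: Position of the '{' character
--
--     Returns:
--         Tuple of (quantifier_string, end_position) or None if not a valid quantifier
--
--     Examples:
--         >>> _parse_quantifier("abc{2}def", 3)
--         ("{2}", 5)
--         >>> _parse_quantifier("abc{2,5}def", 3)
--         ("{2,5}", 7)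
--     """
--     if start_pos >= len(pattern) or pattern[start_pos] != '{':
--         return None
--
--     end_pos = pattern.find('}', start_pos)
--     if end_pos == -1:
--         return None
--
--     quantifier = pattern[start_pos:end_pos + 1]
--
--     # Validate quantifier format: {n}, {m,n}, {m,}, {,n}
--     inner = quantifier[1:-1]
--     if ',' in inner:
--         parts = inner.split(',')
--         if len(parts) != 2:
--             return None
--         # Validate each part is empty or a number
--         for part in parts:
--             if part and not part.isdigit():
--                 return None
--     elif not inner.isdigit():
--         return None
--
--     return (quantifier, end_pos + 1)
-- ===== SOURCE B (Python) =====
-- def _parse_quantifier(pattern: str, start_pos: int) -> tuple[str, int] | None: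
--     """Parse a quantifier like {n}, {m,n}, {m,}, {,n} by a single forward scan."""
--     n = len(pattern)
--     if not (0 <= start_pos < n) or pattern[start_pos] != '{':
--         return None
--     i = start_pos + 1
--     first = i
--     while i < n and pattern[i].isdigit():
--         i += 1
--     if i < n and pattern[i] == ',':
--         i += 1
--         while i < n and pattern[i].isdigit():
--             i += 1
--     elif i == first:
--         return None
--     if i < n and pattern[i] == '}':
--         return (pattern[start_pos:i + 1], i + 1)
--     return None
-- ===== Notes on version B (the rewrite author's own statement) =====
-- stated objective: alternative
-- what changed: A finds the closing '}' with str.find, slices out the inner text and validates it by ',' membership, split(',') and per-part isdigit checks; B is a single forward scan with an index that consumes '{', a digit run, an optional ',' plus second digit run, and '}', never building the inner substring or part list; Pre_ excludes only start_pos < -len(pattern), where A raises IndexError.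
-- intended difference: For negative start_pos (with -len <= start_pos) whose wrapped-around position starts a valid quantifier, A returns that quantifier via Python's accidental negative-index wraparound while B returns None; the parameter is documented as 'Position of the { character', so a negative position is not a valid position and None is the intended result. — e.g. on _parse_quantifier("a{2}", -3): A returns some ("{2}", 4), B returns none
import Mathlib
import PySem

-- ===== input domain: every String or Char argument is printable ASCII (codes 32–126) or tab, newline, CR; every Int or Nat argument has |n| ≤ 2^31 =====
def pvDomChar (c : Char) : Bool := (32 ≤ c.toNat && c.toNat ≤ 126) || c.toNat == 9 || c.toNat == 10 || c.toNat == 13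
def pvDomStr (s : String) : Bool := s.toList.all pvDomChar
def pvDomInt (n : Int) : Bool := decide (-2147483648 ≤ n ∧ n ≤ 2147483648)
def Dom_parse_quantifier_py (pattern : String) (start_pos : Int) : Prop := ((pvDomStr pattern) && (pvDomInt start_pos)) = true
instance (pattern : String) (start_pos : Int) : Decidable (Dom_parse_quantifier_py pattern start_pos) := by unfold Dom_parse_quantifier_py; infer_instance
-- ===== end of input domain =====

-- B replaces A's find-'}'-then-split-and-validate logic with a single forward scan
-- ('{', digit run, optional ',' plus digit run, '}'); B treats a negative start_pos as
-- no-match (returns none) where A wraps around — stated as the intended difference D_.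

-- ===== PORT A =====
-- literal port of A: guard '{', find '}', slice the quantifier, validate the inner
-- part via ',' membership / split / per-part digit test (the for-loop is the List.any).
def parse_quantifier_py (pattern : String) (start_pos : Int) : Option (String × Int) :=
  if PySem.Str.len pattern ≤ start_pos then none
  else
    match PySem.Str.pyGet? pattern start_pos with
    | none => none   -- pattern[start_pos] raises IndexError: excluded by Pre_
    | some c =>
      if c ≠ '{' then none
      else
        let end_pos := PySem.Str.findFrom pattern "}" start_pos
        if end_pos = -1 then none
        else
          let quantifier := PySem.Str.slice pattern (some start_pos) (some (end_pos + 1))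
          let inner := PySem.Str.slice quantifier (some 1) (some (-1))
          if PySem.Str.isIn "," inner then
            match PySem.Str.split? inner "," with
            | none => none   -- unreachable: the separator "," is non-empty
            | some parts =>
              if parts.length ≠ 2 then none
              else if parts.any (fun part => !(PySem.Str.len part = 0) && !PySem.Str.strIsdigit part) then none
              else some (quantifier, end_pos + 1)
          else if !PySem.Str.strIsdigit inner then none
          else some (quantifier, end_pos + 1)

-- ===== PORT B =====
-- B-side helper: one 'while i < n and pattern[i].isdigit(): i += 1' run — returns the
-- run length added to the counter, and the remaining characters.
def pvScanDigits : List Char → Nat → Nat × List Char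
  | [], k => (k, [])
  | c :: rest, k =>
    if PySem.Chars.isdigit c then pvScanDigits rest (k + 1) else (k, c :: rest)

-- literal port of B (Source B): in-range guard, then scan forward; 'i < n and
-- pattern[i] == x' is 'head? = some x' on the unscanned remainder.
def parse_quantifier_py_alt (pattern : String) (start_pos : Int) : Option (String × Int) :=
  let l := pattern.toList
  let n : Int := (l.length : Int)
  if ¬ (0 ≤ start_pos ∧ start_pos < n) then none
  else
    let s := start_pos.toNat
    if l[s]? ≠ some '{' then none
    else
      let p1 := pvScanDigits (l.drop (s + 1)) 0
      if p1.2.head? = some ',' then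
        let p2 := pvScanDigits p1.2.tail 0
        if p2.2.head? = some '}' then
          some (String.ofList ((l.drop s).take (p1.1 + p2.1 + 3)), (s : Int) + (p1.1 + p2.1 + 3))
        else none
      else if p1.1 = 0 then none
      else if p1.2.head? = some '}' then
        some (String.ofList ((l.drop s).take (p1.1 + 2)), (s : Int) + (p1.1 + 2))
      else none

-- ===== PRECONDITION & SPEC =====
-- Pre_ excludes exactly the inputs where A raises IndexError at pattern[start_pos]
-- (start_pos below -len(pattern)); A returns normally everywhere else.
def Pre_parse_quantifier_py (pattern : String) (start_pos : Int) : Prop :=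
  -(pattern.toList.length : Int) ≤ start_pos
instance (pattern : String) (start_pos : Int) : Decidable (Pre_parse_quantifier_py pattern start_pos) := by unfold Pre_parse_quantifier_py; infer_instance
def pvWitness_parse_quantifier_py : String × Int := ("a{2,5}b", 1)

-- For negative start_pos (with -len ≤ start_pos) whose wrapped-around position starts a
-- valid quantifier, A returns that quantifier via Python's accidental negative-index
-- wraparound while B returns none; the parameter is documented as 'Position of the {
-- character', so a negative position is not a valid position and none is intended.
def D_parse_quantifier_py (pattern : String) (start_pos : Int) : Prop :=
  start_pos < 0 ∧
  let t := (PySem.Str.slice pattern (some start_pos) none).toList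
  let body := t.tail.takeWhile (· ≠ '}')
  t.head? = some '{' ∧ t.tail.contains '}' ∧ body ≠ [] ∧
  body.count ',' ≤ 1 ∧ body.all (fun c => PySem.Chars.isdigit c || c == ',')
instance (pattern : String) (start_pos : Int) : Decidable (D_parse_quantifier_py pattern start_pos) := by unfold D_parse_quantifier_py; infer_instance

def Spec_parse_quantifier_py (pattern : String) (start_pos : Int) (out : Option (String × Int)) : Prop := ¬ D_parse_quantifier_py pattern start_pos → out = parse_quantifier_py_alt pattern start_pos
instance (pattern : String) (start_pos : Int) (out : Option (String × Int)) : Decidable (Spec_parse_quantifier_py pattern start_pos out) := by unfold Spec_parse_quantifier_py; infer_instance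

def pvDiffWitness_parse_quantifier_py : String × Int := ("a{2}", -3)
def pvDiffWitnessOut_parse_quantifier_py : (Option (String × Int)) × (Option (String × Int)) := (some ("{2}", 4), none)

-- ===== CLAIM (what is proved, stated in full; the proofs are below) =====
def Claim_unchanged_parse_quantifier_py : Prop := ∀ (pattern : String) (start_pos : Int), Dom_parse_quantifier_py pattern start_pos → Pre_parse_quantifier_py pattern start_pos → Spec_parse_quantifier_py pattern start_pos (parse_quantifier_py pattern start_pos)
def Claim_changed_parse_quantifier_py : Prop := Dom_parse_quantifier_py (pvDiffWitness_parse_quantifier_py.1) (pvDiffWitness_parse_quantifier_py.2) ∧ Pre_parse_quantifier_py (pvDiffWitness_parse_quantifier_py.1) (pvDiffWitness_parse_quantifier_py.2) ∧ D_parse_quantifier_py (pvDiffWitness_parse_quantifier_py.1) (pvDiffWitness_parse_quantifier_py.2) ∧ parse_quantifier_py (pvDiffWitness_parse_quantifier_py.1) (pvDiffWitness_parse_quantifier_py.2) = pvDiffWitnessOut_parse_quantifier_py.1 ∧ parse_quantifier_py_alt (pvDiffWitness_parse_quantifier_py.1) (pvDiffWitness_parse_quantifier_py.2) = pvDiffWitnessOut_parse_quantifier_py.2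 ∧ pvDiffWitnessOut_parse_quantifier_py.1 ≠ pvDiffWitnessOut_parse_quantifier_py.2
def Claim_exact_parse_quantifier_py : Prop := ∀ (pattern : String) (start_pos : Int), Dom_parse_quantifier_py pattern start_pos → Pre_parse_quantifier_py pattern start_pos → D_parse_quantifier_py pattern start_pos → parse_quantifier_py pattern start_pos ≠ parse_quantifier_py_alt pattern start_pos

-- ===== LEMMAS AND PROOFS =====

-- proof-side helper: Bool form of the quantifier-shape condition in D_.
def pvQuantAt (l : List Char) (e : Nat) : Bool :=
  if l[e]? ≠ some '{' then false
  else if '}' ∈ l.drop (e + 1) then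
    let body := (l.drop (e + 1)).takeWhile (fun c => c != '}')
    if ',' ∈ body then
      (!(((body.dropWhile (fun c => c != ',')).tail).contains ',') &&
       (body.takeWhile (fun c => c != ',')).all PySem.Chars.isdigit &&
       ((body.dropWhile (fun c => c != ',')).tail).all PySem.Chars.isdigit)
    else !body.isEmpty && body.all PySem.Chars.isdigit
  else false

theorem quantAt_iff (l : List Char) (e : Nat) :
    pvQuantAt l e = true ↔
      ((l.drop e).head? = some '{' ∧ (l.drop e).tail.contains '}' = true ∧
       (l.drop e).tail.takeWhile (· ≠ '}') ≠ [] ∧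
       ((l.drop e).tail.takeWhile (· ≠ '}')).count ',' ≤ 1 ∧
       ((l.drop e).tail.takeWhile (· ≠ '}')).all (fun c => PySem.Chars.isdigit c || c == ',') = true) := by
  have hf : (fun c : Char => (decide ¬(c = '}') : Bool)) = (fun c => c != '}') := by
    funext c; by_cases h : c = '}' <;> simp [h]
  simp only [ne_eq, hf, List.head?_drop, List.tail_drop]
  unfold pvQuantAt
  by_cases hch : l[e]? = some '{'
  · rw [if_neg (not_not_intro hch), hch]
    by_cases hmem : '}' ∈ l.drop (e + 1)
    · rw [if_pos hmem]
      have hcontains : (l.drop (e + 1)).contains '}' = true := List.contains_iff_mem.mpr hmem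
      by_cases hcm : ',' ∈ (l.drop (e + 1)).takeWhile (fun c => c != '}')
      · rw [if_pos hcm]
        have hdne : ((l.drop (e + 1)).takeWhile (fun c => c != '}')).dropWhile (fun c => c != ',') ≠ [] := by
          rw [ne_eq, List.dropWhile_eq_nil_iff]
          push_neg
          exact ⟨',', hcm, by simp⟩
        obtain ⟨c, b2, hca⟩ := List.exists_cons_of_ne_nil hdne
        have hcEq : c = ',' := by
          have h2 := List.head_dropWhile_not (fun c => c != ',') hdne
          simp only [hca, List.head_cons] at h2
          simpa using h2
        subst hcEq
        have htail : (((l.drop (e + 1)).takeWhile (fun c => c != '}')).dropWhile (fun c => c != ',')).tail = b2 := by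
          rw [hca]; rfl
        have hb : (l.drop (e + 1)).takeWhile (fun c => c != '}')
            = ((l.drop (e + 1)).takeWhile (fun c => c != '}')).takeWhile (fun c => c != ',') ++ ',' :: b2 := by
          conv_lhs => rw [← List.takeWhile_append_dropWhile
            (p := fun c => c != ',') (l := (l.drop (e + 1)).takeWhile (fun c => c != '}'))]
          rw [hca]
        have hnb1 : ',' ∉ ((l.drop (e + 1)).takeWhile (fun c => c != '}')).takeWhile (fun c => c != ',') := by
          intro hx
          have := List.mem_takeWhile_imp hx
          simp at this
        have hcount : ((l.drop (e + 1)).takeWhile (fun c => c != '}')).count ',' = b2.count ',' + 1 := by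
          conv_lhs => rw [hb]
          rw [List.count_append, List.count_eq_zero.mpr hnb1]
          simp [List.count_cons]
        rw [htail]
        simp only [Bool.and_eq_true, Bool.not_eq_true', List.all_eq_true]
        constructor
        · rintro ⟨⟨hc, h1⟩, h2⟩
          have hb2 : ',' ∉ b2 := by simpa using hc
          refine ⟨by simp, hcontains, List.ne_nil_of_mem hcm, ?_, ?_⟩
          · rw [hcount, List.count_eq_zero.mpr hb2]
          · intro x hx
            rw [hb] at hx
            rcases List.mem_append.mp hx with hx1 | hx2
            · simp [h1 x hx1]
            · rcases List.mem_cons.mp hx2 with hx3 | hx4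
              · simp [hx3]
              · simp [h2 x hx4]
        · rintro ⟨-, -, -, hcnt, hall⟩
          have hb2 : ',' ∉ b2 := by
            intro hx
            have h5 : 0 < b2.count ',' := List.count_pos_iff.mpr hx
            omega
          refine ⟨⟨by simpa using hb2, ?_⟩, ?_⟩
          · intro x hx
            have hd : (PySem.Chars.isdigit x || x == ',') = true := hall x (by rw [hb]; simp [hx])
            have hxne : x ≠ ',' := by
              have := List.mem_takeWhile_imp hx
              simpa using this
            simpa [hxne] using hd
          · intro x hx
            have hd : (PySem.Chars.isdigit x || x == ',') = true := hall x (by rw [hb]; simp [hx])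
            have hxne : x ≠ ',' := fun h => hb2 (h ▸ hx)
            simpa [hxne] using hd
      · rw [if_neg hcm]
        have h0 : ((l.drop (e + 1)).takeWhile (fun c => c != '}')).count ',' = 0 :=
          List.count_eq_zero.mpr hcm
        simp only [Bool.and_eq_true, Bool.not_eq_true', List.all_eq_true]
        constructor
        · rintro ⟨hne, hall⟩
          refine ⟨by simp, hcontains, by simpa using hne, by omega, ?_⟩
          intro x hx
          simp [hall x hx]
        · rintro ⟨-, -, hne, -, hall⟩
          refine ⟨by simpa using hne, ?_⟩
          intro x hx
          have hd := hall x hx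
          have hxne : x ≠ ',' := fun h => hcm (h ▸ hx)
          simpa [hxne] using hd
    · rw [if_neg hmem]
      simp only [Bool.false_eq_true, false_iff]
      rintro ⟨-, hc, -⟩
      exact hmem (List.contains_iff_mem.mp hc)
  · rw [if_pos hch]
    simp only [Bool.false_eq_true, false_iff]
    rintro ⟨hh, -⟩
    exact hch hh

-- Python's pattern[start_pos:] for an in-range negative start is the drop at the wrapped index.
theorem slice_suffix (pattern : String) (sp : Int) (e : Nat)
    (hneg : sp < 0) (hpre : -(pattern.toList.length : Int) ≤ sp)
    (he2 : sp + (pattern.toList.length : Int) = (e : Int)) :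
    (PySem.Str.slice pattern (some sp) none).toList = pattern.toList.drop e := by
  have hk0 : sp = -((((-sp).toNat : Nat)) : Int) := by omega
  simp only [PySem.Str.slice, PySem.Chars.slice_eq_listSlice, String.toList_ofList]
  rw [hk0, PySem.List.slice_from_neg_natCast _ _ (by omega)]
  congr 1
  omega

-- pvScanDigits is takeWhile/dropWhile with a counter.
theorem pvScanDigits_eq (cs : List Char) (k : Nat) :
    pvScanDigits cs k = (k + (cs.takeWhile PySem.Chars.isdigit).length, cs.dropWhile PySem.Chars.isdigit) := by
  induction cs generalizing k with
  | nil => simp [pvScanDigits]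
  | cons c rest ih =>
    by_cases h : PySem.Chars.isdigit c
    · simp [pvScanDigits, h, ih]; omega
    · simp [pvScanDigits, h]

-- Chars.find with a single-character needle is takeWhile-length.
theorem find_go_single (x : Char) (t : List Char) (k : Nat) :
    PySem.Chars.find.go [x] t k =
      if x ∈ t then ((k : Int) + (t.takeWhile (fun c => c != x)).length) else -1 := by
  induction t generalizing k with
  | nil => simp [PySem.Chars.find.go]
  | cons c rest ih =>
    by_cases h : c = x
    · subst h
      simp [PySem.Chars.find.go, List.isPrefixOf]
    · have hne : ¬ x = c := fun hx => h hx.symm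
      simp only [PySem.Chars.find.go, List.isPrefixOf, List.mem_cons]
      simp [hne, h, ih, bne_iff_ne]
      split <;> push_cast <;> omega

theorem find_single (x : Char) (t : List Char) :
    PySem.Chars.find t [x] =
      if x ∈ t then ((t.takeWhile (fun c => c != x)).length : Int) else -1 := by
  simpa using find_go_single x t 0

theorem isIn_single (x : Char) (t : List Char) :
    PySem.Chars.isIn [x] t = decide (x ∈ t) := by
  unfold PySem.Chars.isIn
  rw [find_single]
  by_cases h : x ∈ t <;> simp [h] <;> omega

-- splitOn with a single-character separator, functionally.
def pvSplit (x : Char) : List Char → List Char × List (List Char)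
  | [] => ([], [])
  | c :: t =>
    let r := pvSplit x t
    if c = x then ([], r.1 :: r.2) else (c :: r.1, r.2)

theorem splitOn_go_single (x : Char) (t : List Char) :
    ∀ (fuel : Nat) (cur : List Char) (acc : List (List Char)), t.length < fuel →
      PySem.Chars.splitOn.go [x] fuel t cur acc =
        acc.reverse ++ ((cur.reverse ++ (pvSplit x t).1) :: (pvSplit x t).2) := by
  induction t with
  | nil =>
    intro fuel cur acc hf
    match fuel with
    | f + 1 => simp [PySem.Chars.splitOn.go, pvSplit]
  | cons c rest ih =>
    intro fuel cur acc hf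
    match fuel with
    | f + 1 =>
      have hr : rest.length < f := by simpa using hf
      by_cases h : c = x
      · subst h
        simp only [PySem.Chars.splitOn.go, List.isPrefixOf, BEq.rfl, Bool.true_and,
          if_pos]
        rw [show List.drop [c].length (c :: rest) = rest from by simp] <;> try rfl
        rw [ih f [] (cur.reverse :: acc) hr]
        simp [pvSplit]
      · simp only [PySem.Chars.splitOn.go, List.isPrefixOf]
        have : (x == c) = false := beq_eq_false_iff_ne.mpr (fun hx => h hx.symm)
        simp only [this, Bool.false_and, if_neg Bool.false_ne_true]
        rw [ih f (c :: cur) acc hr]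
        have hxc : ¬ x = c := fun hx => h hx.symm
        simp [pvSplit, h, hxc]

theorem splitOn_single (x : Char) (t : List Char) :
    PySem.Chars.splitOn t [x] = (pvSplit x t).1 :: (pvSplit x t).2 := by
  unfold PySem.Chars.splitOn
  rw [splitOn_go_single x t (t.length + 1) [] [] (by omega)]
  simp

theorem pvSplit_of_not_mem (x : Char) (t : List Char) (h : x ∉ t) :
    pvSplit x t = (t, []) := by
  induction t with
  | nil => simp [pvSplit]
  | cons c rest ih =>
    simp only [List.mem_cons, not_or] at h
    have hcx : ¬ c = x := fun hx => h.1 hx.symm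
    simp [pvSplit, hcx, ih h.2]

theorem pvSplit_snd_nil_iff (x : Char) (t : List Char) :
    (pvSplit x t).2 = [] ↔ x ∉ t := by
  induction t with
  | nil => simp [pvSplit]
  | cons c rest ih =>
    by_cases h : c = x
    · subst h; simp [pvSplit]
    · simp [pvSplit, h, ih]
      exact fun _ hx => h hx.symm

theorem pvSplit_append (x : Char) (d r : List Char) (h : x ∉ d) :
    pvSplit x (d ++ x :: r) = (d, (pvSplit x r).1 :: (pvSplit x r).2) := by
  induction d with
  | nil => simp [pvSplit]
  | cons c rest ih =>
    simp only [List.mem_cons, not_or] at h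
    have hcx : ¬ c = x := fun hx => h.1 hx.symm
    simp [pvSplit, hcx, ih h.2]

theorem pvSplit_fst (x : Char) (t : List Char) :
    (pvSplit x t).1 = t.takeWhile (fun c => c != x) := by
  induction t with
  | nil => simp [pvSplit]
  | cons c rest ih =>
    by_cases h : c = x
    · subst h; simp [pvSplit]
    · simp [pvSplit, h, ih, bne_iff_ne]

theorem part_ok (p : List Char) (h : ∀ x ∈ p, PySem.Chars.isdigit x = true) :
    (!p.isEmpty && !PySem.Chars.strIsdigit p) = false := by
  have h1 : p.all PySem.Chars.isdigit = true := List.all_eq_true.mpr h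
  cases p with
  | nil => simp
  | cons a t => simp [PySem.Chars.strIsdigit, h1]

-- a part is not-rejected by A's loop iff all its characters are digits
theorem part_bad_eq (p : List Char) :
    (!p.isEmpty && !PySem.Chars.strIsdigit p) = !p.all PySem.Chars.isdigit := by
  cases p with
  | nil => simp
  | cons a t => simp [PySem.Chars.strIsdigit]

theorem pv_head?_mem {α : Type} {l : List α} {a : α} (h : l.head? = some a) : a ∈ l := by
  cases l <;> simp_all

-- index/scan arithmetic helpers for the normalised position e
theorem pyGet_eval (l : List Char) (sp : Int) (e : Nat)
    (he : (if 0 ≤ sp then sp else sp + (l.length : Int)) = (e : Int))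
    (hel : e < l.length) :
    PySem.List.pyGet? l sp = some l[e] := by
  unfold PySem.List.pyGet? PySem.List.pyIdx?
  rcases le_or_gt 0 sp with h | h
  · rw [if_pos h] at he
    rw [if_pos h, if_pos (by omega)]
    have h2 : sp.toNat = e := by omega
    show l[sp.toNat]? = some l[e]
    rw [h2]
    exact List.getElem?_eq_getElem hel
  · rw [if_neg (by omega : ¬ 0 ≤ sp)] at he
    rw [if_neg (by omega : ¬ 0 ≤ sp), if_pos (by omega : -(l.length : Int) ≤ sp)]
    have h2 : l.length - (-sp).toNat = e := by omega
    show l[l.length - (-sp).toNat]? = some l[e]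
    rw [h2]
    exact List.getElem?_eq_getElem hel

theorem findFrom_eval (l : List Char) (sp : Int) (e : Nat)
    (he : (if 0 ≤ sp then sp else sp + (l.length : Int)) = (e : Int))
    (hel : e < l.length) :
    PySem.Chars.findFrom l ['}'] sp none =
      if '}' ∈ l.drop e then (e : Int) + ((l.drop e).takeWhile (fun c => c != '}')).length
      else -1 := by
  simp only [PySem.Chars.findFrom]
  have hst : (if sp < 0 then if sp + (l.length : Int) < 0 then 0 else sp + (l.length : Int) else sp)
      = (e : Int) := by
    rcases le_or_gt 0 sp with h | h
    · rw [if_pos h] at he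
      rw [if_neg (by omega)]
      exact he
    · rw [if_neg (by omega)] at he
      rw [if_pos (by omega), if_neg (by omega)]
      exact he
  rw [hst]
  rw [if_neg (by omega : ¬ ((l.length : Int) < (e : Int)))]
  simp only [Int.toNat_natCast, List.take_length]
  rw [find_single]
  by_cases hmem : '}' ∈ l.drop e
  · rw [if_pos hmem, if_pos hmem, if_neg (by omega)]
  · rw [if_neg hmem, if_neg hmem, if_pos rfl]

theorem slice_eval (l : List Char) (sp : Int) (e m : Nat)
    (he : (if 0 ≤ sp then sp else sp + (l.length : Int)) = (e : Int))
    (hm : e + m ≤ l.length) :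
    PySem.List.slice l (some sp) (some ((e : Int) + (m : Int))) = (l.drop e).take m := by
  simp only [PySem.List.slice]
  have ha : PySem.List.clampIdx l.length sp = e := by
    unfold PySem.List.clampIdx
    rcases le_or_gt 0 sp with h | h
    · rw [if_pos h] at he
      rw [if_neg (by omega)]
      omega
    · rw [if_neg (by omega)] at he
      rw [if_pos (by omega), if_neg (by omega)]
      omega
  have hb : PySem.List.clampIdx l.length ((e : Int) + (m : Int)) = e + m := by
    unfold PySem.List.clampIdx
    rw [if_neg (by omega)]
    omega
  rw [ha, hb]
  congr 1
  omega

theorem slice_inner (inner : List Char) :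
    PySem.List.slice ('{' :: (inner ++ ['}'])) (some 1) (some (-1)) = inner := by
  have h1 : ('{' :: (inner ++ ['}'])).length = inner.length + 2 := by simp
  simp only [PySem.List.slice, h1]
  have ha : PySem.List.clampIdx (inner.length + 2) 1 = 1 := by
    unfold PySem.List.clampIdx
    rw [if_neg (by omega)]
    omega
  have hb : PySem.List.clampIdx (inner.length + 2) (-1) = inner.length + 1 := by
    unfold PySem.List.clampIdx
    rw [if_pos (by omega), if_neg (by omega)]
    omega
  rw [ha, hb]
  have h2 : inner.length + 1 - 1 = inner.length := by omega
  rw [h2, List.drop_one, List.tail_cons]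
  exact List.take_left' rfl

-- A's validation of the text between the braces, at the character-list level.
def pvValidA (inner : List Char) : Bool :=
  if PySem.Chars.isIn [','] inner then
    (PySem.Chars.splitOn inner [',']).length == 2 &&
      !((PySem.Chars.splitOn inner [',']).any fun p => !p.isEmpty && !PySem.Chars.strIsdigit p)
  else PySem.Chars.strIsdigit inner

-- A's validation branch computes 'if pvValidA inner then res else none'.
theorem A_validate_eq (inner : List Char) (res : Option (String × Int)) :
    (if PySem.Str.isIn "," (String.ofList inner) then
       match PySem.Str.split? (String.ofList inner) "," with
       | none => none
       | some parts =>
         if parts.length ≠ 2 then none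
         else if parts.any (fun part => !(PySem.Str.len part = 0) && !PySem.Str.strIsdigit part) then none
         else res
     else if !PySem.Str.strIsdigit (String.ofList inner) then none else res)
    = if pvValidA inner = true then res else none := by
  unfold pvValidA
  have h1 : PySem.Str.isIn "," (String.ofList inner) = PySem.Chars.isIn [','] inner := by
    simp [PySem.Str.isIn]
  rw [h1]
  by_cases hmem : PySem.Chars.isIn [','] inner = true
  · rw [if_pos hmem, if_pos hmem]
    have h2 : PySem.Str.split? (String.ofList inner) "," =
        some ((PySem.Chars.splitOn inner [',']).map String.ofList) := by
      simp [PySem.Str.split?, PySem.Chars.split?]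
    rw [h2]
    simp only [List.length_map, List.any_map]
    have h3 : (PySem.Chars.splitOn inner [',']).any
          ((fun part => !decide (PySem.Str.len part = 0) && !PySem.Str.strIsdigit part) ∘ String.ofList)
        = (PySem.Chars.splitOn inner [',']).any (fun p => !p.isEmpty && !PySem.Chars.strIsdigit p) := by
      congr 1
      funext p
      match p with
      | [] => simp [Function.comp, PySem.Str.len, PySem.Str.strIsdigit]
      | c :: t =>
        simp [Function.comp, PySem.Str.len, PySem.Str.strIsdigit]
        intro _
        omega
    rw [h3]
    by_cases hlen : (PySem.Chars.splitOn inner [',']).length = 2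
    · by_cases hany : (PySem.Chars.splitOn inner [',']).any (fun p => !p.isEmpty && !PySem.Chars.strIsdigit p) = true
      · simp [hlen, hany]
      · simp [hlen, hany]
    · simp [hlen]
  · rw [if_neg hmem, if_neg hmem]
    by_cases hd : PySem.Chars.strIsdigit inner = true <;>
      simp [PySem.Str.strIsdigit, hd]

-- pvValidA expressed with takeWhile/dropWhile around the first comma (the form pvQuantAt uses).
theorem pvValidA_char (inner : List Char) :
    pvValidA inner =
      (if ',' ∈ inner then
        (!(((inner.dropWhile (fun c => c != ',')).tail).contains ',') &&
         (inner.takeWhile (fun c => c != ',')).all PySem.Chars.isdigit &&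
         ((inner.dropWhile (fun c => c != ',')).tail).all PySem.Chars.isdigit)
      else !inner.isEmpty && inner.all PySem.Chars.isdigit) := by
  unfold pvValidA
  rw [isIn_single]
  by_cases hm : ',' ∈ inner
  · rw [decide_eq_true hm, if_pos rfl, if_pos hm]
    -- decompose inner at the first comma
    have hdne : inner.dropWhile (fun c => c != ',') ≠ [] := by
      rw [ne_eq, List.dropWhile_eq_nil_iff]
      push_neg
      exact ⟨',', hm, by simp⟩
    obtain ⟨c, a, hca⟩ := List.exists_cons_of_ne_nil hdne
    have hcEq : c = ',' := by
      have h2 := List.head_dropWhile_not (fun c => c != ',') hdne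
      simp only [hca, List.head_cons] at h2
      simpa using h2
    subst hcEq
    have hb : inner = inner.takeWhile (fun c => c != ',') ++ ',' :: a := by
      conv_lhs => rw [← List.takeWhile_append_dropWhile (p := fun c => c != ',') (l := inner)]
      rw [hca]
    have hnb : ',' ∉ inner.takeWhile (fun c => c != ',') := by
      intro hx
      have := List.mem_takeWhile_imp hx
      simp at this
    have hta : (inner.dropWhile (fun c => c != ',')).tail = a := by rw [hca]; rfl
    rw [splitOn_single]
    conv_lhs => rw [hb]
    rw [pvSplit_append ',' _ a hnb, hta]
    by_cases ha : ',' ∈ a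
    · have hP2 : (pvSplit ',' a).2 ≠ [] := fun h => ((pvSplit_snd_nil_iff ',' a).mp h) ha
      obtain ⟨q, qs, hq2⟩ := List.exists_cons_of_ne_nil hP2
      simp [hq2, ha]
    · rw [pvSplit_of_not_mem ',' a ha]
      have hc2 : a.contains ',' = false := by
        simp [ha]
      simp only [List.length_cons, List.length_nil, List.any_cons, List.any_nil,
        part_bad_eq, hc2]
      simp
  · rw [decide_eq_false hm, if_neg (by simp), if_neg hm]
    cases inner with
    | nil => simp [PySem.Chars.strIsdigit]
    | cons a t => simp [PySem.Chars.strIsdigit]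

-- when position e carries '{' and the text to the first following '}' is inner,
-- pvQuantAt is exactly A's validation of inner.
theorem quantAt_decomp (l : List Char) (e : Nat) (inner rest : List Char)
    (hel : e < l.length) (hch : l[e] = '{')
    (hd1 : l.drop (e + 1) = inner ++ '}' :: rest) (hnb : '}' ∉ inner) :
    pvQuantAt l e = pvValidA inner := by
  have htwinner : inner.takeWhile (fun c => c != '}') = inner :=
    List.takeWhile_eq_self_iff.mpr (fun x hx => by
      simp only [bne_iff_ne, ne_eq]
      exact fun hxe => hnb (hxe ▸ hx))
  have htw : (l.drop (e + 1)).takeWhile (fun c => c != '}') = inner := by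
    rw [hd1, List.takeWhile_append, htwinner, if_pos rfl,
      List.takeWhile_cons_of_neg (by decide), List.append_nil]
  unfold pvQuantAt
  rw [List.getElem?_eq_getElem hel, hch,
    if_neg (by simp), if_pos (by rw [hd1]; simp), htw, pvValidA_char]

-- the two evaluation lemmas: on a true '{' at normalised position e with the next
-- '}' decomposition given, both ports compute the same validated result.
theorem A_eval (pattern : String) (sp : Int) (e : Nat) (inner rest : List Char)
    (he : (if 0 ≤ sp then sp else sp + (pattern.toList.length : Int)) = (e : Int))
    (hlt : sp < (pattern.toList.length : Int)) (hpre : -(pattern.toList.length : Int) ≤ sp)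
    (hc : pattern.toList.drop e = '{' :: (inner ++ '}' :: rest))
    (hnb : '}' ∉ inner) :
    parse_quantifier_py pattern sp =
      if pvValidA inner = true
      then some (String.ofList ('{' :: (inner ++ ['}'])), (e : Int) + inner.length + 2)
      else none := by
  have hel : e < pattern.toList.length := by
    by_contra hno
    rw [List.drop_eq_nil_of_le (by omega)] at hc
    simp at hc
  have hdec := List.drop_eq_getElem_cons hel
  rw [hdec] at hc
  simp only [List.cons.injEq] at hc
  obtain ⟨hch, hrest⟩ := hc
  have hde : pattern.toList.drop e = '{' :: (inner ++ '}' :: rest) := by rw [hdec, hch, hrest]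
  have hmem2 : '}' ∈ pattern.toList.drop e := by rw [hde]; simp
  have htwinner : inner.takeWhile (fun c => c != '}') = inner :=
    List.takeWhile_eq_self_iff.mpr (fun x hx => by
      simp only [bne_iff_ne, ne_eq]
      exact fun hxe => hnb (hxe ▸ hx))
  have htw : (pattern.toList.drop e).takeWhile (fun c => c != '}') = '{' :: inner := by
    rw [hde, List.takeWhile_cons_of_pos (by decide), List.takeWhile_append, htwinner,
      if_pos rfl, List.takeWhile_cons_of_neg (by decide), List.append_nil]
  have hff : PySem.Chars.findFrom pattern.toList ['}'] sp none
      = (e : Int) + ((inner.length + 1 : Nat) : Int) := by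
    rw [findFrom_eval _ sp e he hel, if_pos hmem2, htw]
    simp
  have hffS : PySem.Str.findFrom pattern "}" sp = (e : Int) + ((inner.length + 1 : Nat) : Int) := by
    simp only [PySem.Str.findFrom, show ("}" : String).toList = ['}'] from rfl]
    exact hff
  have hm : e + (inner.length + 2) ≤ pattern.toList.length := by
    have h5 : (pattern.toList.drop e).length = pattern.toList.length - e := List.length_drop
    rw [hde] at h5
    simp only [List.length_cons, List.length_append] at h5
    omega
  have htake : (pattern.toList.drop e).take (inner.length + 2) = '{' :: (inner ++ ['}']) := by
    rw [hde, show inner.length + 2 = (inner.length + 1) + 1 from rfl, List.take_succ_cons,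
      show inner ++ '}' :: rest = (inner ++ ['}']) ++ rest from by simp,
      List.take_left' (by simp)]
  have hq : PySem.Str.slice pattern (some sp) (some ((e : Int) + ((inner.length + 1 : Nat) : Int) + 1))
      = String.ofList ('{' :: (inner ++ ['}'])) := by
    simp only [PySem.Str.slice, PySem.Chars.slice_eq_listSlice]
    rw [show (e : Int) + ((inner.length + 1 : Nat) : Int) + 1
        = (e : Int) + ((inner.length + 2 : Nat) : Int) from by push_cast; ring]
    rw [slice_eval _ sp e (inner.length + 2) he hm, htake]
  have hi : PySem.Str.slice (String.ofList ('{' :: (inner ++ ['}']))) (some 1) (some (-1))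
      = String.ofList inner := by
    simp only [PySem.Str.slice, PySem.Chars.slice_eq_listSlice, String.toList_ofList]
    rw [slice_inner]
  have hg : PySem.Str.pyGet? pattern sp = some pattern.toList[e] := by
    simp only [PySem.Str.pyGet?, PySem.Chars.pyGet?_eq_listPyGet?]
    exact pyGet_eval _ sp e he hel
  unfold parse_quantifier_py
  rw [if_neg (show ¬ PySem.Str.len pattern ≤ sp by simp only [PySem.Str.len]; omega)]
  simp only [hg]
  rw [if_neg (show ¬ pattern.toList[e] ≠ '{' from by simp [hch])]
  rw [hffS]
  rw [if_neg (show ¬ ((e : Int) + ((inner.length + 1 : Nat) : Int) = -1) from by push_cast; omega)]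
  rw [hq, hi]
  rw [A_validate_eq inner
    (some (String.ofList ('{' :: (inner ++ ['}'])), (e : Int) + ((inner.length + 1 : Nat) : Int) + 1))]
  rw [show (e : Int) + ((inner.length + 1 : Nat) : Int) + 1 = (e : Int) + inner.length + 2 from by
    push_cast; ring]

theorem B_eval (pattern : String) (sp : Int) (e : Nat) (inner rest : List Char)
    (hsp : 0 ≤ sp) (he2 : sp = (e : Int))
    (hlt : sp < (pattern.toList.length : Int))
    (hc : pattern.toList.drop e = '{' :: (inner ++ '}' :: rest))
    (hnb : '}' ∉ inner) :
    parse_quantifier_py_alt pattern sp =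
      if pvValidA inner = true
      then some (String.ofList ('{' :: (inner ++ ['}'])), (e : Int) + inner.length + 2)
      else none := by
  have hel : e < pattern.toList.length := by omega
  have hdec := List.drop_eq_getElem_cons hel
  rw [hdec] at hc
  simp only [List.cons.injEq] at hc
  obtain ⟨hch, hrest⟩ := hc
  have hde : pattern.toList.drop e = '{' :: (inner ++ '}' :: rest) := by rw [hdec, hch, hrest]
  have htake : (pattern.toList.drop e).take (inner.length + 2) = '{' :: (inner ++ ['}']) := by
    rw [hde, show inner.length + 2 = (inner.length + 1) + 1 from rfl, List.take_succ_cons,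
      show inner ++ '}' :: rest = (inner ++ ['}']) ++ rest from by simp,
      List.take_left' (by simp)]
  have hsN : sp.toNat = e := by omega
  simp only [parse_quantifier_py_alt]
  rw [if_neg (not_not_intro ⟨hsp, by omega⟩), hsN]
  rw [List.getElem?_eq_getElem hel]
  rw [if_neg (by simp [hch])]
  rw [hrest]
  simp only [pvScanDigits_eq]
  by_cases hall : ∀ x ∈ inner, PySem.Chars.isdigit x = true
  · have htw : (inner ++ '}' :: rest).takeWhile PySem.Chars.isdigit = inner := by
      rw [List.takeWhile_append, if_pos (by rw [List.takeWhile_eq_self_iff.mpr hall]),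
        List.takeWhile_cons_of_neg (by decide), List.append_nil]
    have hdw : (inner ++ '}' :: rest).dropWhile PySem.Chars.isdigit = '}' :: rest := by
      rw [List.dropWhile_append, List.dropWhile_eq_nil_iff.mpr hall]
      simp [List.dropWhile_cons_of_neg (by decide : ¬ PySem.Chars.isdigit '}' = true)]
    rw [htw, hdw]
    rw [if_neg (show ¬ (('}' :: rest).head? = some ',') from by simp)]
    have hcm : ',' ∉ inner := fun hm => absurd (hall _ hm) (by decide)
    by_cases hni : inner.length = 0
    · have hinil : inner = [] := List.length_eq_zero_iff.mp hni
      subst hinil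
      rw [if_pos (by simp)]
      rw [if_neg (show ¬ pvValidA [] = true from by decide)]
    · have hne : inner ≠ [] := fun h => hni (by simp [h])
      rw [if_neg (show ¬ (0 + inner.length = 0) from by omega)]
      rw [if_pos (show (('}' :: rest).head? = some '}') from rfl)]
      have hval : pvValidA inner = true := by
        unfold pvValidA
        rw [isIn_single, decide_eq_false hcm]
        simp [PySem.Chars.strIsdigit, List.all_eq_true, List.isEmpty_iff, hne]
        exact hall
      rw [if_pos hval]
      simp only [Nat.zero_add, htake, Option.some.injEq, Prod.mk.injEq]
      exact ⟨by simp, by push_cast; omega⟩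
  · have hdne : inner.dropWhile PySem.Chars.isdigit ≠ [] := by
      rw [ne_eq, List.dropWhile_eq_nil_iff]
      exact hall
    obtain ⟨c, r', hcr⟩ := List.exists_cons_of_ne_nil hdne
    have hcd : PySem.Chars.isdigit c = false := by
      have h2 := List.head_dropWhile_not PySem.Chars.isdigit hdne
      simp only [hcr, List.head_cons] at h2
      exact h2
    have hcm : c ∈ inner := (List.dropWhile_suffix (l := inner) PySem.Chars.isdigit).mem (by rw [hcr]; simp)
    have hcbrace : c ≠ '}' := fun h => hnb (h ▸ hcm)
    have hlenne : ¬ ((inner.takeWhile PySem.Chars.isdigit).length = inner.length) := by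
      intro hlen
      have h3 := (List.takeWhile_prefix (p := PySem.Chars.isdigit) (l := inner)).eq_of_length hlen
      rw [List.takeWhile_eq_self_iff] at h3
      exact hall h3
    have hDdec : inner = inner.takeWhile PySem.Chars.isdigit ++ c :: r' := by
      conv_lhs => rw [← List.takeWhile_append_dropWhile (p := PySem.Chars.isdigit) (l := inner)]
      rw [hcr]
    have hallD : ∀ x ∈ inner.takeWhile PySem.Chars.isdigit, PySem.Chars.isdigit x = true :=
      fun x hx => List.mem_takeWhile_imp hx
    have htw2 : (inner ++ '}' :: rest).takeWhile PySem.Chars.isdigit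
        = inner.takeWhile PySem.Chars.isdigit := by
      rw [List.takeWhile_append, if_neg hlenne]
    have hdw2 : (inner ++ '}' :: rest).dropWhile PySem.Chars.isdigit = c :: (r' ++ '}' :: rest) := by
      rw [List.dropWhile_append, if_neg (by simp [hcr]), hcr, List.cons_append]
    rw [htw2, hdw2]
    by_cases hc2 : c = ','
    · subst hc2
      rw [if_pos (by simp)]
      simp only [List.tail_cons]
      have hcmem : ',' ∈ inner := hcm
      have hnD : ',' ∉ inner.takeWhile PySem.Chars.isdigit :=
        fun hm => absurd (hallD _ hm) (by decide)
      by_cases hall2 : ∀ x ∈ r', PySem.Chars.isdigit x = true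
      · have hdw3 : (r' ++ '}' :: rest).dropWhile PySem.Chars.isdigit = '}' :: rest := by
          rw [List.dropWhile_append, List.dropWhile_eq_nil_iff.mpr hall2]
          simp [List.dropWhile_cons_of_neg (by decide : ¬ PySem.Chars.isdigit '}' = true)]
        have htw3 : (r' ++ '}' :: rest).takeWhile PySem.Chars.isdigit = r' := by
          rw [List.takeWhile_append, if_pos (by rw [List.takeWhile_eq_self_iff.mpr hall2]),
            List.takeWhile_cons_of_neg (by decide), List.append_nil]
        rw [hdw3, htw3]
        rw [if_pos (by simp)]
        have hval : pvValidA inner = true := by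
          unfold pvValidA
          rw [isIn_single, decide_eq_true hcmem, if_pos rfl, splitOn_single]
          conv_lhs => rw [hDdec]
          rw [pvSplit_append ',' _ r' hnD, pvSplit_of_not_mem ',' r'
            (fun hm => absurd (hall2 _ hm) (by decide))]
          simp only [List.length_cons, List.length_nil, List.any_cons, List.any_nil,
            part_ok _ hallD, part_ok _ hall2]
          simp
        rw [if_pos hval]
        have hqq : 0 + (inner.takeWhile PySem.Chars.isdigit).length + (0 + r'.length) + 3
            = inner.length + 2 := by
          conv_rhs => rw [hDdec]
          simp
          omega
        rw [hqq, htake]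
        simp only [Option.some.injEq, Prod.mk.injEq]
        refine ⟨by simp, ?_⟩
        have h8 := congrArg List.length hDdec
        simp only [List.length_append, List.length_cons] at h8
        push_cast
        omega
      · have hdne2 : r'.dropWhile PySem.Chars.isdigit ≠ [] := by
          rw [ne_eq, List.dropWhile_eq_nil_iff]
          exact hall2
        obtain ⟨c2, r'', hcr2⟩ := List.exists_cons_of_ne_nil hdne2
        have hc2d : PySem.Chars.isdigit c2 = false := by
          have h2 := List.head_dropWhile_not PySem.Chars.isdigit hdne2
          simp only [hcr2, List.head_cons] at h2
          exact h2
        have hc2mem : c2 ∈ r' := (List.dropWhile_suffix (l := r') PySem.Chars.isdigit).mem (by rw [hcr2]; simp)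
        have hc2inner : c2 ∈ inner := by rw [hDdec]; simp [hc2mem]
        have hc2brace : c2 ≠ '}' := fun h => hnb (h ▸ hc2inner)
        have hdw3 : (r' ++ '}' :: rest).dropWhile PySem.Chars.isdigit
            = c2 :: (r'' ++ '}' :: rest) := by
          rw [List.dropWhile_append, if_neg (by simp [hcr2]), hcr2, List.cons_append]
        rw [hdw3]
        rw [if_neg (by simp [hc2brace])]
        have hval : pvValidA inner = false := by
          unfold pvValidA
          rw [isIn_single, decide_eq_true hcmem, if_pos rfl, splitOn_single]
          conv_lhs => rw [hDdec]
          rw [pvSplit_append ',' _ r' hnD]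
          by_cases hr2 : ',' ∈ r'
          · have hP2 : (pvSplit ',' r').2 ≠ [] := fun h => ((pvSplit_snd_nil_iff ',' r').mp h) hr2
            obtain ⟨q, qs, hq2⟩ := List.exists_cons_of_ne_nil hP2
            simp [hq2]
          · rw [pvSplit_of_not_mem ',' r' hr2]
            have hr'ne : r' ≠ [] := fun h => by rw [h] at hc2mem; simp at hc2mem
            have hbad : (!r'.isEmpty && !PySem.Chars.strIsdigit r') = true := by
              have h6 : PySem.Chars.strIsdigit r' = false := by
                unfold PySem.Chars.strIsdigit
                have h7 : r'.all PySem.Chars.isdigit = false := by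
                  rw [List.all_eq_false]
                  exact ⟨c2, hc2mem, by simp [hc2d]⟩
                simp [h7]
              simp [h6, List.isEmpty_iff, hr'ne]
            simp [hbad]
        rw [if_neg (by simp [hval])]
    · rw [if_neg (by simp [hc2])]
      have hval : pvValidA inner = false := by
        unfold pvValidA
        by_cases h4 : ',' ∈ inner
        · rw [isIn_single, decide_eq_true h4, if_pos rfl, splitOn_single, pvSplit_fst]
          have hDne : ∀ x ∈ inner.takeWhile PySem.Chars.isdigit, (x != ',') = true := by
            intro x hx
            simp only [bne_iff_ne, ne_eq]
            exact fun hxe => absurd (hallD x hx) (by rw [hxe]; decide)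
          have htw4 : inner.takeWhile (fun a => a != ',')
              = inner.takeWhile PySem.Chars.isdigit ++ c :: (r'.takeWhile (fun a => a != ',')) := by
            conv_lhs => rw [hDdec]
            rw [List.takeWhile_append, if_pos (by rw [List.takeWhile_eq_self_iff.mpr hDne]),
              List.takeWhile_cons_of_pos (by simp [bne_iff_ne, hc2])]
          have hbad : (!(inner.takeWhile (fun a => a != ',')).isEmpty
              && !PySem.Chars.strIsdigit (inner.takeWhile (fun a => a != ','))) = true := by
            rw [htw4]
            have h6 : PySem.Chars.strIsdigit
                (inner.takeWhile PySem.Chars.isdigit ++ c :: (r'.takeWhile (fun a => a != ','))) = false := by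
              unfold PySem.Chars.strIsdigit
              have h7 : (inner.takeWhile PySem.Chars.isdigit ++ c :: (r'.takeWhile (fun a => a != ','))).all
                  PySem.Chars.isdigit = false := by
                rw [List.all_eq_false]
                exact ⟨c, by simp, by simp [hcd]⟩
              simp [h7]
            simp [h6, List.isEmpty_iff]
          simp [hbad]
        · rw [isIn_single, decide_eq_false h4, if_neg (by simp)]
          unfold PySem.Chars.strIsdigit
          have h7 : inner.all PySem.Chars.isdigit = false := by
            rw [List.all_eq_false]
            exact ⟨c, hcm, by simp [hcd]⟩
          simp [h7]
      by_cases hz : 0 + (inner.takeWhile PySem.Chars.isdigit).length = 0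
      · rw [if_pos hz, if_neg (by simp [hval])]
      · rw [if_neg hz]
        rw [if_neg (fun h => hcbrace (by simpa using h))]
        rw [if_neg (by simp [hval])]

theorem A_none (pattern : String) (sp : Int) (e : Nat)
    (he : (if 0 ≤ sp then sp else sp + (pattern.toList.length : Int)) = (e : Int))
    (hlt : sp < (pattern.toList.length : Int)) (hpre : -(pattern.toList.length : Int) ≤ sp)
    (hel : e < pattern.toList.length)
    (hmem : '}' ∉ pattern.toList.drop e) :
    parse_quantifier_py pattern sp = none := by
  unfold parse_quantifier_py
  rw [if_neg (show ¬ PySem.Str.len pattern ≤ sp by simp only [PySem.Str.len]; omega)]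
  have hg : PySem.Str.pyGet? pattern sp = some pattern.toList[e] := by
    simp only [PySem.Str.pyGet?, PySem.Chars.pyGet?_eq_listPyGet?]
    exact pyGet_eval _ sp e he hel
  rw [hg]
  by_cases hch : pattern.toList[e] = '{'
  · have hff : PySem.Chars.findFrom pattern.toList ['}'] sp none = -1 := by
      rw [findFrom_eval _ sp e he hel, if_neg hmem]
    simp [hch, hff]
  · simp [hch]

theorem B_none (pattern : String) (sp : Int) (e : Nat)
    (hsp : 0 ≤ sp) (he2 : sp = (e : Int))
    (hlt : sp < (pattern.toList.length : Int))
    (hmem : '}' ∉ pattern.toList.drop e) :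
    parse_quantifier_py_alt pattern sp = none := by
  have hel : e < pattern.toList.length := by omega
  have hmem1 : '}' ∉ pattern.toList.drop (e + 1) := by
    rw [List.drop_eq_getElem_cons hel] at hmem
    exact fun h => hmem (List.mem_cons_of_mem _ h)
  have hchain : ∀ x : Char,
      (List.dropWhile PySem.Chars.isdigit
        ((List.dropWhile PySem.Chars.isdigit (pattern.toList.drop (e + 1))).tail)).head? = some x →
      x ∈ pattern.toList.drop (e + 1) := by
    intro x hx
    have h1 := pv_head?_mem hx
    exact ((List.dropWhile_suffix _).trans ((List.tail_suffix _).trans (List.dropWhile_suffix _))).mem h1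
  have hchain1 : ∀ x : Char,
      (List.dropWhile PySem.Chars.isdigit (pattern.toList.drop (e + 1))).head? = some x →
      x ∈ pattern.toList.drop (e + 1) := by
    intro x hx
    exact (List.dropWhile_suffix _).mem (pv_head?_mem hx)
  have hsN : sp.toNat = e := by omega
  simp only [parse_quantifier_py_alt]
  rw [if_neg (not_not_intro ⟨hsp, by omega⟩), hsN]
  rw [List.getElem?_eq_getElem hel]
  by_cases hch : pattern.toList[e] = '{'
  · rw [if_neg (by simp [hch])]
    simp only [pvScanDigits_eq]
    by_cases h1 : (List.dropWhile PySem.Chars.isdigit (pattern.toList.drop (e + 1))).head? = some ','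
    · rw [if_pos h1]
      rw [if_neg (fun h => hmem1 (hchain '}' h))]
    · rw [if_neg h1]
      by_cases hz : 0 + ((pattern.toList.drop (e + 1)).takeWhile PySem.Chars.isdigit).length = 0
      · rw [if_pos hz]
      · rw [if_neg hz]
        rw [if_neg (fun h => hmem1 (hchain1 '}' h))]
  · rw [if_pos (by simp [hch])]

theorem A_nobrace (pattern : String) (sp : Int) (e : Nat)
    (he : (if 0 ≤ sp then sp else sp + (pattern.toList.length : Int)) = (e : Int))
    (hlt : sp < (pattern.toList.length : Int)) (hpre : -(pattern.toList.length : Int) ≤ sp)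
    (hel : e < pattern.toList.length)
    (hch : pattern.toList[e] ≠ '{') :
    parse_quantifier_py pattern sp = none := by
  unfold parse_quantifier_py
  rw [if_neg (show ¬ PySem.Str.len pattern ≤ sp by simp only [PySem.Str.len]; omega)]
  have hg : PySem.Str.pyGet? pattern sp = some pattern.toList[e] := by
    simp only [PySem.Str.pyGet?, PySem.Chars.pyGet?_eq_listPyGet?]
    exact pyGet_eval _ sp e he hel
  rw [hg]
  simp [hch]

theorem B_nobrace (pattern : String) (sp : Int) (e : Nat)
    (hsp : 0 ≤ sp) (he2 : sp = (e : Int))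
    (hlt : sp < (pattern.toList.length : Int))
    (hch : pattern.toList[e] ≠ '{') :
    parse_quantifier_py_alt pattern sp = none := by
  have hel : e < pattern.toList.length := by omega
  have hsN : sp.toNat = e := by omega
  simp only [parse_quantifier_py_alt]
  rw [if_neg (not_not_intro ⟨hsp, by omega⟩), hsN]
  rw [List.getElem?_eq_getElem hel]
  rw [if_pos (by simp [hch])]

-- B returns none on every negative start_pos.
theorem B_neg (pattern : String) (sp : Int) (hsp : sp < 0) :
    parse_quantifier_py_alt pattern sp = none := by
  simp only [parse_quantifier_py_alt]
  rw [if_pos (show ¬ (0 ≤ sp ∧ sp < ((pattern.toList.length : Nat) : Int)) from fun h => absurd h.1 (by omega))]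

-- A returns none iff the (normalised) position does not start a valid quantifier.
theorem A_none_iff_quantAt (pattern : String) (sp : Int) (e : Nat)
    (he : (if 0 ≤ sp then sp else sp + (pattern.toList.length : Int)) = (e : Int))
    (hlt : sp < (pattern.toList.length : Int)) (hpre : -(pattern.toList.length : Int) ≤ sp)
    (hel : e < pattern.toList.length) :
    (parse_quantifier_py pattern sp = none ↔ pvQuantAt pattern.toList e = false) := by
  by_cases hch : pattern.toList[e] = '{'
  · have hdec := List.drop_eq_getElem_cons hel
    by_cases hmem : '}' ∈ pattern.toList.drop (e + 1)
    · have hdne : (pattern.toList.drop (e+1)).dropWhile (fun c => c != '}') ≠ [] := by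
        intro h0
        rw [List.dropWhile_eq_nil_iff] at h0
        have := h0 _ hmem; simp at this
      obtain ⟨c, tl, hct⟩ := List.exists_cons_of_ne_nil hdne
      have hcEq : c = '}' := by
        have h2 := List.head_dropWhile_not (fun c => c != '}') hdne
        simp only [hct, List.head_cons] at h2
        simpa using h2
      have hsplit : pattern.toList.drop (e+1) = (pattern.toList.drop (e+1)).takeWhile (fun c => c != '}') ++ '}' :: tl := by
        conv_lhs => rw [← List.takeWhile_append_dropWhile (p := fun c => c != '}') (l := pattern.toList.drop (e+1))]
        rw [hct, hcEq]
      have hnb : '}' ∉ (pattern.toList.drop (e+1)).takeWhile (fun c => c != '}') := by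
        intro hmm
        have := List.mem_takeWhile_imp hmm
        simp at this
      have hc : pattern.toList.drop e = '{' :: ((pattern.toList.drop (e+1)).takeWhile (fun c => c != '}') ++ '}' :: tl) := by
        rw [hdec, hch, ← hsplit]
      rw [A_eval pattern sp e _ tl he hlt hpre hc hnb,
        quantAt_decomp pattern.toList e _ tl hel hch hsplit hnb]
      by_cases hv : pvValidA ((pattern.toList.drop (e+1)).takeWhile (fun c => c != '}')) = true
      · simp [hv]
      · rw [Bool.not_eq_true] at hv
        simp [hv]
    · have hmem' : '}' ∉ pattern.toList.drop e := by
        rw [hdec, hch]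
        simp only [List.mem_cons, not_or]
        exact ⟨by decide, hmem⟩
      rw [A_none pattern sp e he hlt hpre hel hmem']
      unfold pvQuantAt
      rw [List.getElem?_eq_getElem hel, hch, if_neg (by simp), if_neg hmem]
      simp
  · rw [A_nobrace pattern sp e he hlt hpre hel hch]
    unfold pvQuantAt
    rw [List.getElem?_eq_getElem hel, if_pos (by simp [hch])]
    simp

-- A = B on every in-range non-negative start_pos.
theorem AB_eq_pos (pattern : String) (sp : Int)
    (hsp : 0 ≤ sp) (hlt : sp < (pattern.toList.length : Int)) :
    parse_quantifier_py pattern sp = parse_quantifier_py_alt pattern sp := by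
  obtain ⟨e, he2⟩ : ∃ e : Nat, sp = (e : Int) := ⟨sp.toNat, by omega⟩
  have he : (if 0 ≤ sp then sp else sp + (pattern.toList.length : Int)) = (e : Int) := by
    rw [if_pos hsp]; exact he2
  have hpre : -(pattern.toList.length : Int) ≤ sp := by omega
  have hel : e < pattern.toList.length := by omega
  by_cases hch : pattern.toList[e] = '{'
  · have hdec := List.drop_eq_getElem_cons hel
    by_cases hmem : '}' ∈ pattern.toList.drop (e + 1)
    · have hdne : (pattern.toList.drop (e+1)).dropWhile (fun c => c != '}') ≠ [] := by
        intro h0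
        rw [List.dropWhile_eq_nil_iff] at h0
        have := h0 _ hmem; simp at this
      obtain ⟨c, tl, hct⟩ := List.exists_cons_of_ne_nil hdne
      have hcEq : c = '}' := by
        have h2 := List.head_dropWhile_not (fun c => c != '}') hdne
        simp only [hct, List.head_cons] at h2
        simpa using h2
      have hsplit : pattern.toList.drop (e+1) = (pattern.toList.drop (e+1)).takeWhile (fun c => c != '}') ++ '}' :: tl := by
        conv_lhs => rw [← List.takeWhile_append_dropWhile (p := fun c => c != '}') (l := pattern.toList.drop (e+1))]
        rw [hct, hcEq]
      have hnb : '}' ∉ (pattern.toList.drop (e+1)).takeWhile (fun c => c != '}') := by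
        intro hmm
        have := List.mem_takeWhile_imp hmm
        simp at this
      have hc : pattern.toList.drop e = '{' :: ((pattern.toList.drop (e+1)).takeWhile (fun c => c != '}') ++ '}' :: tl) := by
        rw [hdec, hch, ← hsplit]
      rw [A_eval pattern sp e _ tl he hlt hpre hc hnb, B_eval pattern sp e _ tl hsp he2 hlt hc hnb]
    · have hmem' : '}' ∉ pattern.toList.drop e := by
        rw [hdec, hch]
        simp only [List.mem_cons, not_or]
        exact ⟨by decide, hmem⟩
      rw [A_none pattern sp e he hlt hpre hel hmem', B_none pattern sp e hsp he2 hlt hmem']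
  · rw [A_nobrace pattern sp e he hlt hpre hel hch, B_nobrace pattern sp e hsp he2 hlt hch]

-- ===== VERDICT (by name: the statement is the Claim_ definition above) =====
theorem parse_quantifier_py_spec : Claim_unchanged_parse_quantifier_py := by
  intro pattern sp _ hpre
  unfold Pre_parse_quantifier_py at hpre
  unfold Spec_parse_quantifier_py
  intro hnd
  by_cases h0 : 0 ≤ sp
  · by_cases hge : (pattern.toList.length : Int) ≤ sp
    · have h1 : ((pattern.length : Int)) ≤ sp := by simpa using hge
      have h2 : ¬ (0 ≤ sp ∧ sp < ((pattern.toList.length : Int))) := by push_neg; intro; omega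
      simp [parse_quantifier_py, parse_quantifier_py_alt, PySem.Str.len, h1, h2]
    · exact AB_eq_pos pattern sp h0 (by omega)
  · have hneg : sp < 0 := by omega
    obtain ⟨e, he2⟩ : ∃ e : Nat, sp + (pattern.toList.length : Int) = (e : Int) :=
      ⟨(sp + (pattern.toList.length : Int)).toNat, by omega⟩
    have he : (if 0 ≤ sp then sp else sp + (pattern.toList.length : Int)) = (e : Int) := by
      rw [if_neg h0]; exact he2
    have hel : e < pattern.toList.length := by omega
    have hsl := slice_suffix pattern sp e hneg hpre he2
    have hq : pvQuantAt pattern.toList e = false := by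
      by_contra h5
      rw [Bool.not_eq_false] at h5
      refine hnd ⟨hneg, ?_⟩
      simp only [hsl]
      exact (quantAt_iff _ _).mp h5
    rw [B_neg pattern sp hneg]
    exact (A_none_iff_quantAt pattern sp e he (by omega) hpre hel).mpr hq

set_option maxRecDepth 100000 in
theorem parse_quantifier_py_changed : Claim_changed_parse_quantifier_py := by
  unfold Claim_changed_parse_quantifier_py; decide

theorem parse_quantifier_py_tight : Claim_exact_parse_quantifier_py := by
  intro pattern sp _ hpre hd
  unfold Pre_parse_quantifier_py at hpre
  obtain ⟨hneg, hcond⟩ := hd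
  obtain ⟨e, he2⟩ : ∃ e : Nat, sp + (pattern.toList.length : Int) = (e : Int) :=
    ⟨(sp + (pattern.toList.length : Int)).toNat, by omega⟩
  have he : (if 0 ≤ sp then sp else sp + (pattern.toList.length : Int)) = (e : Int) := by
    rw [if_neg (by omega)]; exact he2
  have hsl := slice_suffix pattern sp e hneg hpre he2
  have hq : pvQuantAt pattern.toList e = true := by
    refine (quantAt_iff _ _).mpr ?_
    rw [← hsl]
    exact hcond
  have hlen : 0 < (pattern.toList.length : Int) := by omega
  have hel : e < pattern.toList.length := by omega
  intro hAB
  rw [B_neg pattern sp hneg] at hAB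
  have := (A_none_iff_quantAt pattern sp e he (by omega) hpre hel).mp hAB
  rw [hq] at this
  exact absurd this (by simp)
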